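-- pv_equiv track=rewrite | github.com/chesstrian/codility | challenges/alpha_2010/prefix_set.py | solution
-- ===== SOURCE A (Python) =====
-- def solution(a):
--     count = dict()
--     for i in a:
--         if i in count:
--             count[i] += 1
--         else:
--             count[i] = 1
--
--     desired = len(count)
--     new_count = dict()
--     for i, v in enumerate(a):
--         if v in new_count:
--             new_count[v] += 1
--         else:
--             new_count[v] = 1
--
--         if desired == len(new_count):
--             return i
--
--     return len(a) - 1
-- ===== SOURCE B (Python) =====
-- def solution(a):
--     first = {}
--     for i, v in enumerate(a):
--         if v not in first:
--             first[v] = i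
--     return max(first.values(), default=-1)
-- ===== Notes on version B (the rewrite author's own statement) =====
-- stated objective: simpler
-- what changed: Replaces A's two passes (full count dict, then a grow-a-dict-and-compare-its-size-each-step scan with early return) by one first-occurrence pass plus a final max over the recorded first indices (-1 default for the empty list).
import Mathlib
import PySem

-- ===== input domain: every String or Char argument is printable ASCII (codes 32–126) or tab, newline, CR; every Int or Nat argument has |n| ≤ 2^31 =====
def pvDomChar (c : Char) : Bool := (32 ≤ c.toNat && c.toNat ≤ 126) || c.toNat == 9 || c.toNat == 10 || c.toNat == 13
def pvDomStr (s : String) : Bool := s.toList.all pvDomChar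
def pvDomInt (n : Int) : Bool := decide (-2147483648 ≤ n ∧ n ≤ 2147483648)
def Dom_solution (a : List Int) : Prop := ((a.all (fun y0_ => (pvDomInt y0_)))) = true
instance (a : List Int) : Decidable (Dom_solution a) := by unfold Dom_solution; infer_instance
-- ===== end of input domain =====

-- B replaces A's two passes (full count dict, then a grow-a-dict-and-check-its-size scan
-- with early return) by one first-occurrence pass plus a final max (default -1): simpler.

-- ===== PORT A =====
-- the count-building step shared by both of A's loops: `if i in count: count[i] += 1 else: count[i] = 1`
def pvStepA (d : PySem.Dict Int Int) (v : Int) : PySem.Dict Int Int :=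
  if d.contains v then d.modify v 0 (· + 1) else d.insert v 1

-- A's second loop with its early return (`return i` ↦ some i; falling off the loop ↦ none)
def pvLoopA (desired : Nat) (nc : PySem.Dict Int Int) : List (Int × Int) → Option Int
  | [] => none
  | (i, v) :: rest =>
    let nc' := pvStepA nc v
    if desired = nc'.size then some i else pvLoopA desired nc' rest

def solution (a : List Int) : Int :=
  let count := a.foldl pvStepA PySem.Dict.empty
  let desired := count.size
  (pvLoopA desired PySem.Dict.empty (PySem.List.enumerate a)).getD ((a.length : Int) - 1)

-- ===== PORT B =====
-- `if v not in first: first[v] = i`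
def pvStepB (d : PySem.Dict Int Int) (p : Int × Int) : PySem.Dict Int Int :=
  if !(d.contains p.2) then d.insert p.2 p.1 else d

def solution_alt (a : List Int) : Int :=
  let first := (PySem.List.enumerate a).foldl pvStepB PySem.Dict.empty
  PySem.List.maxD first.values (fun x => x) (-1)

-- ===== PRECONDITION & SPEC =====
def Spec_solution (a : List Int) (out : Int) : Prop := out = solution_alt a
instance (a : List Int) (out : Int) : Decidable (Spec_solution a out) := by unfold Spec_solution; infer_instance

-- ===== CLAIM (what is proved, stated in full; the proofs are below) =====
def Claim_equal_solution : Prop := ∀ (a : List Int), Dom_solution a → Spec_solution a (solution a)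

-- ===== LEMMAS AND PROOFS =====

theorem keys_pvStepA (d : PySem.Dict Int Int) (v : Int) :
    (pvStepA d v).keys = PySem.Set.add d.keys v := by
  unfold pvStepA
  by_cases h : d.contains v = true
  · rw [if_pos h, PySem.Dict.keys_modify, PySem.Dict.keys_insert_of_contains d _ h,
      PySem.Set.add_of_mem ((PySem.Dict.contains_iff_mem_keys d v).mp h)]
  · rw [if_neg h, PySem.Dict.keys_insert_of_not_contains d _ (by simpa using h),
      PySem.Set.add_of_not_mem (fun hm => h ((PySem.Dict.contains_iff_mem_keys d v).mpr hm))]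

theorem keys_foldl_pvStepA (l : List Int) (d : PySem.Dict Int Int) :
    (l.foldl pvStepA d).keys = PySem.Set.update d.keys l := by
  induction l generalizing d with
  | nil => rfl
  | cons x t ih =>
      simp only [List.foldl_cons, PySem.Set.update_cons, ih, keys_pvStepA]

theorem size_eq_keys_length (d : PySem.Dict Int Int) : d.size = d.keys.length := by
  simp [PySem.Dict.size, PySem.Dict.keys]

theorem len_le_update (s : PySem.Set Int) (l : List Int) :
    s.length ≤ (PySem.Set.update s l).length := by
  induction l generalizing s with
  | nil => simp [PySem.Set.update]
  | cons x t ih =>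
      rw [PySem.Set.update_cons]
      refine le_trans ?_ (ih (PySem.Set.add s x))
      rw [PySem.Set.add_eq_ite]
      split_ifs <;> simp

theorem update_eq_of_len_eq (s : PySem.Set Int) (l : List Int)
    (h : (PySem.Set.update s l).length = s.length) : ∀ x ∈ l, x ∈ s := by
  induction l generalizing s with
  | nil => simp
  | cons x t ih =>
      intro y hy
      rw [PySem.Set.update_cons] at h
      have hle := len_le_update (PySem.Set.add s x) t
      have hxs : x ∈ s := by
        by_contra hx
        rw [PySem.Set.add_of_not_mem hx] at h hle
        simp at h hle; omega
      rw [PySem.Set.add_of_mem hxs] at h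
      rcases List.mem_cons.mp hy with rfl | hy'
      · exact hxs
      · exact ih s h y hy'

theorem foldl_pvStepB_of_all_mem (l : List (Int × Int)) (d : PySem.Dict Int Int)
    (h : ∀ p ∈ l, d.contains p.2 = true) : l.foldl pvStepB d = d := by
  induction l with
  | nil => rfl
  | cons p t ih =>
      have hp := h p List.mem_cons_self
      simp only [List.foldl_cons, pvStepB, hp, Bool.not_true, Bool.false_eq_true]
      exact ih (fun q hq => h q (List.mem_cons_of_mem _ hq))

-- the main joint invariant: starting with equal key-sets and B-values all < i and strictly
-- fewer seen keys than the grand total `desired`, A's loop returns some j and j is the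
-- maximum (and a member) of B's final values.
theorem pvMain (rest : List Int) (i : Int) (nc dF : PySem.Dict Int Int) (desired : Nat)
    (hk : nc.keys = dF.keys)
    (hv : ∀ w ∈ dF.values, w < i)
    (hD : (PySem.Set.update dF.keys rest).length = desired)
    (hlt : dF.keys.length < desired) :
    ∃ j, pvLoopA desired nc (PySem.List.enumerate rest i) = some j ∧
      j ∈ ((PySem.List.enumerate rest i).foldl pvStepB dF).values ∧
      (∀ w ∈ ((PySem.List.enumerate rest i).foldl pvStepB dF).values, w ≤ j) := by
  induction rest generalizing i nc dF with
  | nil =>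
      exfalso
      simp only [PySem.Set.update_nil] at hD
      omega
  | cons v r ih =>
      rw [PySem.List.enumerate_cons]
      simp only [List.foldl_cons, pvLoopA]
      have hsz : (pvStepA nc v).size = (PySem.Set.add dF.keys v).length := by
        rw [size_eq_keys_length, keys_pvStepA, hk]
      by_cases hmemk : v ∈ dF.keys
      · -- already seen: A's dict keeps its key set, B's dict is unchanged
        have hcB : dF.contains v = true := (PySem.Dict.contains_iff_mem_keys dF v).mpr hmemk
        have hB : pvStepB dF (i, v) = dF := by simp [pvStepB, hcB]
        have hksz : (pvStepA nc v).size = dF.keys.length := by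
          rw [hsz, PySem.Set.add_of_mem hmemk]
        rw [if_neg (by omega), hB]
        refine ih (i + 1) (pvStepA nc v) dF ?_ ?_ ?_ hlt
        · rw [keys_pvStepA, hk, PySem.Set.add_of_mem hmemk]
        · intro w hw; have := hv w hw; omega
        · rw [← hD, PySem.Set.update_cons, PySem.Set.add_of_mem hmemk]
      · -- first occurrence: both dicts gain the key v, B records index i
        have hcB : dF.contains v = false := by
          by_contra h
          exact hmemk ((PySem.Dict.contains_iff_mem_keys dF v).mp
            (by revert h; cases h' : dF.contains v <;> simp))
        have hB : pvStepB dF (i, v) = dF.insert v i := by simp [pvStepB, hcB]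
        have hkeys' : (dF.insert v i).keys = dF.keys ++ [v] :=
          PySem.Dict.keys_insert_of_not_contains dF i hcB
        have hvals' : (dF.insert v i).values = dF.values ++ [i] := by
          simp [PySem.Dict.values, PySem.Dict.items_insert_of_not_contains dF i hcB]
        have hksz : (pvStepA nc v).size = dF.keys.length + 1 := by
          rw [hsz, PySem.Set.add_of_not_mem hmemk]; simp
        have hD' : (PySem.Set.update (dF.insert v i).keys r).length = desired := by
          rw [hkeys', ← PySem.Set.add_of_not_mem hmemk, ← PySem.Set.update_cons, hD]
        rw [hB]
        by_cases hfin : desired = dF.keys.length + 1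
        · -- the last distinct value: A returns i; B makes no further insert
          rw [if_pos (by omega)]
          have hlen : (PySem.Set.update (dF.insert v i).keys r).length =
              (dF.insert v i).keys.length := by
            rw [hD', hkeys']; simp [hfin]
          have hall : ∀ p ∈ PySem.List.enumerate r (i + 1), (dF.insert v i).contains p.2 = true := by
            intro p hp
            obtain ⟨k, hklt, rfl⟩ := (PySem.List.mem_enumerate_iff _ _ _).mp hp
            exact (PySem.Dict.contains_iff_mem_keys _ _).mpr
              (update_eq_of_len_eq _ _ hlen _ (List.getElem_mem hklt))
          have hfold : (PySem.List.enumerate r (i + 1)).foldl pvStepB (dF.insert v i)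
              = dF.insert v i := foldl_pvStepB_of_all_mem _ _ hall
          refine ⟨i, rfl, ?_, ?_⟩
          · rw [hfold, hvals']; simp
          · intro w hw
            rw [hfold, hvals'] at hw
            rcases List.mem_append.mp hw with hw' | hw'
            · exact le_of_lt (hv w hw')
            · simp at hw'; omega
        · -- not yet complete: recurse
          rw [if_neg (by omega)]
          refine ih (i + 1) (pvStepA nc v) (dF.insert v i) ?_ ?_ hD' ?_
          · rw [keys_pvStepA, hk, PySem.Set.add_of_not_mem hmemk, hkeys']
          · intro w hw
            rw [hvals'] at hw
            rcases List.mem_append.mp hw with hw' | hw'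
            · have := hv w hw'; omega
            · simp at hw'; omega
          · have hle := len_le_update (dF.insert v i).keys r
            rw [hD'] at hle
            rw [hkeys'] at hle ⊢
            simp only [List.length_append, List.length_cons, List.length_nil] at hle ⊢
            omega

-- max of a nonempty list equals j when j is a member and an upper bound
theorem maxD_eq_of_mem_of_ub (xs : List Int) (j : Int)
    (hm : j ∈ xs) (hub : ∀ w ∈ xs, w ≤ j) :
    PySem.List.maxD xs (fun x => x) (-1) = j := by
  cases xs with
  | nil => cases hm
  | cons x t =>
      have h := PySem.List.max?_id_cons x t
      have hmem := PySem.List.foldl_max_mem t x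
      have hle := PySem.List.le_foldl_max t x
      simp only [PySem.List.maxD, h, Option.getD_some]
      have h1 : t.foldl max x ≤ j := by
        rcases hmem with he | hmem'
        · rw [he]; exact hub x List.mem_cons_self
        · exact hub _ (List.mem_cons_of_mem _ hmem')
      have h2 : j ≤ t.foldl max x := by
        rcases List.mem_cons.mp hm with rfl | hm'
        · exact hle.1
        · exact hle.2 _ hm'
      omega

-- ===== VERDICT (by name: the statement is the Claim_ definition above) =====
theorem solution_spec : Claim_equal_solution := by
  intro a _
  unfold Spec_solution solution solution_alt
  cases a with
  | nil => decide
  | cons x t =>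
      have hkeys : ((x :: t).foldl pvStepA PySem.Dict.empty).keys = PySem.Set.ofList (x :: t) := by
        rw [keys_foldl_pvStepA]; rfl
      set desired := ((x :: t).foldl pvStepA PySem.Dict.empty).size with hdes
      have hdlen : desired = (PySem.Set.ofList (x :: t)).length := by
        rw [hdes, size_eq_keys_length, hkeys]
      have hpos : 0 < desired := by
        rw [hdlen, PySem.Set.ofList_cons]; simp
      obtain ⟨j, hA, hmem, hub⟩ := pvMain (x :: t) 0 PySem.Dict.empty PySem.Dict.empty desired
        rfl (by simp [PySem.Dict.values, PySem.Dict.empty])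
        (by simpa [PySem.Dict.keys, PySem.Dict.empty, PySem.Set.update_nil_left] using hdlen.symm)
        (by simpa [PySem.Dict.keys, PySem.Dict.empty] using hpos)
      show (pvLoopA desired PySem.Dict.empty (PySem.List.enumerate (x :: t))).getD
          (((x :: t).length : Int) - 1)
        = PySem.List.maxD ((PySem.List.enumerate (x :: t)).foldl pvStepB PySem.Dict.empty).values
            (fun x => x) (-1)
      rw [hA, Option.getD_some, maxD_eq_of_mem_of_ub _ j hmem hub]
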